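-- pv_equiv track=rewrite | github.com/lambda-scale/lambda-scale | lambda-scale/serve/utils/utils.py | split_memory_region
-- ===== SOURCE A (Python) =====
-- def split_memory_region(num_parts,original_ptr,original_size):
--     part_size = original_size // num_parts
--     remaining_size = original_size % num_parts
--
--     ptrs = []
--     sizes = []
--
--     current_ptr = original_ptr
--
--     for i in range(num_parts):
--         size = part_size + (1 if i < remaining_size else 0)
--         ptrs.append(current_ptr)
--         sizes.append(size)
--
--         current_ptr += size
--
--     return ptrs, sizes
-- ===== SOURCE B (Python) =====
-- def split_memory_region(num_parts, original_ptr, original_size):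
--     part_size = original_size // num_parts
--     remaining_size = original_size % num_parts
--     ptrs = [original_ptr + i * part_size + min(i, remaining_size)
--             for i in range(num_parts)]
--     sizes = [part_size + (1 if i < remaining_size else 0)
--              for i in range(num_parts)]
--     return ptrs, sizes
-- ===== Notes on version B (the rewrite author's own statement) =====
-- stated objective: simpler
-- what changed: Drops the running current_ptr accumulator: each pointer is computed directly by the closed form original_ptr + i*part_size + min(i, remaining_size), so the result is two comprehensions instead of a stateful loop.
import Mathlib
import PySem

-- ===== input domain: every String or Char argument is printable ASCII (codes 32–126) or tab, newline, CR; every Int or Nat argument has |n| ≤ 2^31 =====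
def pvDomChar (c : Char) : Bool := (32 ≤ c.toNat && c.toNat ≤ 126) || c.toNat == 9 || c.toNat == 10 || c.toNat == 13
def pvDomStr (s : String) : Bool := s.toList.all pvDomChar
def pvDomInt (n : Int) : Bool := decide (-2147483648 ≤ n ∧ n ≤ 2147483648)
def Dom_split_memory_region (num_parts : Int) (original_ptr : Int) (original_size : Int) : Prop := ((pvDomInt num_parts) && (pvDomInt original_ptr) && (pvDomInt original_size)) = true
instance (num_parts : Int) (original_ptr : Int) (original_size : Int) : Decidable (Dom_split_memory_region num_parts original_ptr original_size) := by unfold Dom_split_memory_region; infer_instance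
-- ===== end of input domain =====

-- B replaces A's running current_ptr accumulator with a direct closed-form pointer per index (simpler, same cost).

-- ===== PORT A =====
def split_memory_region (num_parts : Int) (original_ptr : Int) (original_size : Int) : List Int × List Int :=
  let part_size := PySem.Int.floordiv original_size num_parts
  let remaining_size := PySem.Int.mod original_size num_parts
  let st := (PySem.List.pyRange 0 num_parts 1).foldl
    (fun (st : List Int × List Int × Int) i =>
      let size := part_size + (if i < remaining_size then 1 else 0)
      (st.1 ++ [st.2.2], st.2.1 ++ [size], st.2.2 + size))
    ([], [], original_ptr)
  (st.1, st.2.1)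

-- ===== PORT B =====
def split_memory_region_alt (num_parts : Int) (original_ptr : Int) (original_size : Int) : List Int × List Int :=
  let part_size := PySem.Int.floordiv original_size num_parts
  let remaining_size := PySem.Int.mod original_size num_parts
  ((PySem.List.pyRange 0 num_parts 1).map
      (fun i => original_ptr + i * part_size + min i remaining_size),
   (PySem.List.pyRange 0 num_parts 1).map
      (fun i => part_size + (if i < remaining_size then 1 else 0)))

-- ===== PRECONDITION & SPEC =====
-- Pre_ excludes exactly num_parts = 0, where Python's '//' raises ZeroDivisionError in both A and B.
def Pre_split_memory_region (num_parts : Int) (original_ptr : Int) (original_size : Int) : Prop := num_parts ≠ 0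
instance (num_parts : Int) (original_ptr : Int) (original_size : Int) : Decidable (Pre_split_memory_region num_parts original_ptr original_size) := by unfold Pre_split_memory_region; infer_instance
def pvWitness_split_memory_region : Int × Int × Int := (3, 100, 10)

def Spec_split_memory_region (num_parts : Int) (original_ptr : Int) (original_size : Int) (out : List Int × List Int) : Prop := out = split_memory_region_alt num_parts original_ptr original_size
instance (num_parts : Int) (original_ptr : Int) (original_size : Int) (out : List Int × List Int) : Decidable (Spec_split_memory_region num_parts original_ptr original_size out) := by unfold Spec_split_memory_region; infer_instance

-- ===== CLAIM (what is proved, stated in full; the proofs are below) =====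
def Claim_equal_split_memory_region : Prop := ∀ (num_parts : Int) (original_ptr : Int) (original_size : Int), Dom_split_memory_region num_parts original_ptr original_size → Pre_split_memory_region num_parts original_ptr original_size → Spec_split_memory_region num_parts original_ptr original_size (split_memory_region num_parts original_ptr original_size)

-- ===== LEMMAS AND PROOFS =====

-- Loop invariant: after folding over range(0,n), A's state equals B's two maps plus the
-- closed-form current pointer p0 + n*ps + min n r.
theorem smr_loop_inv (ps r p0 : Int) (hr : 0 ≤ r) (n : Nat) :
    (PySem.List.pyRange 0 (n : Int) 1).foldl
      (fun (st : List Int × List Int × Int) i =>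
        let size := ps + (if i < r then 1 else 0)
        (st.1 ++ [st.2.2], st.2.1 ++ [size], st.2.2 + size))
      ([], [], p0)
    = ((PySem.List.pyRange 0 (n : Int) 1).map (fun i => p0 + i * ps + min i r),
       (PySem.List.pyRange 0 (n : Int) 1).map (fun i => ps + (if i < r then 1 else 0)),
       p0 + n * ps + min (n : Int) r) := by
  induction n with
  | zero =>
      simp
      exact hr
  | succ k ih =>
      have hc : ((k + 1 : Nat) : Int) = (k : Int) + 1 := by push_cast; ring
      rw [hc, PySem.List.pyRange_one_succ_right (by positivity), List.foldl_append,
          List.map_append, List.map_append, ih]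
      simp only [List.foldl_cons, List.foldl_nil, List.map_cons, List.map_nil, Prod.mk.injEq]
      refine ⟨trivial, trivial, ?_⟩
      rcases le_or_gt r (k : Int) with h | h
      · rw [if_neg (not_lt.mpr h), min_eq_right h, min_eq_right (by omega)]; ring
      · rw [if_pos h, min_eq_left (by omega), min_eq_left (by omega)]; ring

-- ===== VERDICT (by name: the statement is the Claim_ definition above) =====
theorem split_memory_region_spec : Claim_equal_split_memory_region := by
  intro n p s _ hpre
  unfold Spec_split_memory_region split_memory_region split_memory_region_alt
  rcases lt_trichotomy n 0 with h | h | h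
  · rw [PySem.List.pyRange_one_eq_nil (by omega)]; rfl
  · exact absurd h hpre
  · have hr : 0 ≤ PySem.Int.mod s n := PySem.Int.mod_nonneg s h
    have hn : n = ((n.toNat : Nat) : Int) := by omega
    have hr' : (0:Int) ≤ PySem.Int.mod s ((n.toNat : Nat) : Int) := hn ▸ hr
    rw [hn]
    simp only [smr_loop_inv _ _ _ hr']
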